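-- pv_equiv track=rewrite | github.com/m0rtega/Proyecto2-AnalizadorLexico | lectura.py | modoAuto2
-- ===== SOURCE A (Python) =====
-- def modoAuto2(dictyT):
--     for k,v in dictyT.items():
--         temp = v
--         temporal = ""
--         cont = 0
--         primera = True
--         segunda = False
--         while cont < len(temp):
--             if(temp[cont] == "\"" and primera):
--                 temporal += "Ƈ"
--                 primera = False
--                 segunda = True
--             elif(temp[cont] == "\"" and segunda):
--                 temporal += "Ɔ"
--                 primera = True
--                 segunda = False
--             else:
--                 temporal += temp[cont]
--             cont+=1
--         dictyT[k] = temporal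
--     return dictyT
-- ===== SOURCE B (Python) =====
-- def modoAuto2(dictyT):
--     for k, v in dictyT.items():
--         parts = v.split('"')
--         out = parts[0]
--         for i, p in enumerate(parts[1:]):
--             out += ('\u0187' if i % 2 == 0 else '\u0186') + p
--         dictyT[k] = out
--     return dictyT
-- ===== Notes on version B (the rewrite author's own statement) =====
-- stated objective: simpler
-- what changed: Replaces the stateful per-character while-loop with two boolean flags by a split on the quote character plus a rejoin that interleaves the two glyphs by position parity.
import Mathlib
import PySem

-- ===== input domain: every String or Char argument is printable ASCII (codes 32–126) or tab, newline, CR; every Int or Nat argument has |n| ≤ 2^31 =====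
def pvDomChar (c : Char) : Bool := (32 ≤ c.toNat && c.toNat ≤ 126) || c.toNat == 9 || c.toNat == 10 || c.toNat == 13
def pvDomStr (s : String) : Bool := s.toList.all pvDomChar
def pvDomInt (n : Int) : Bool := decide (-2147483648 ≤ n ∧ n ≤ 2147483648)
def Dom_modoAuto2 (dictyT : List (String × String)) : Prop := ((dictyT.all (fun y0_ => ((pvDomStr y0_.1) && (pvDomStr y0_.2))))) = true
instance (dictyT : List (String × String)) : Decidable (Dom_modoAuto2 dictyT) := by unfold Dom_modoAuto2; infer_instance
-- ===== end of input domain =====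

-- B replaces A's stateful two-flag character loop by split-on-quote + parity-interleaved rejoin
-- (objective: simpler). A mutates its dict argument in place; the equivalence proved here is
-- about the RETURN value only.

-- ===== PORT A =====
-- A's while-loop over temp with state (temporal, primera, segunda), transcribed as a fold
-- over the characters with the same triple of state variables.
def pvAVal (v : List Char) : List Char :=
  (v.foldl
    (fun (st : List Char × Bool × Bool) c =>
      if c == '"' && st.2.1 then (st.1 ++ ['Ƈ'], false, true)
      else if c == '"' && st.2.2 then (st.1 ++ ['Ɔ'], true, false)
      else (st.1 ++ [c], st.2.1, st.2.2))
    ([], true, false)).1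

def modoAuto2 (dictyT : List (String × String)) : List (String × String) :=
  dictyT.map (fun kv => (kv.1, String.ofList (pvAVal kv.2.toList)))

-- ===== PORT B =====
-- Source B: parts = v.split('"'); out = parts[0]; for i, p in enumerate(parts[1:]):
--   out += ('Ƈ' if i % 2 == 0 else 'Ɔ') + p
def pvBVal (v : List Char) : List Char :=
  let parts := PySem.Chars.splitOn v ['"']
  (PySem.List.enumerate (PySem.List.slice parts (some 1) none)).foldl
    (fun out ip =>
      out ++ (if PySem.Int.mod ip.1 2 == 0 then ['Ƈ'] else ['Ɔ']) ++ ip.2)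
    (PySem.List.pyGetD parts 0 [])

def modoAuto2_alt (dictyT : List (String × String)) : List (String × String) :=
  dictyT.map (fun kv => (kv.1, String.ofList (pvBVal kv.2.toList)))

-- ===== PRECONDITION & SPEC =====
def Spec_modoAuto2 (dictyT : List (String × String)) (out : List (String × String)) : Prop := out = modoAuto2_alt dictyT
instance (dictyT : List (String × String)) (out : List (String × String)) : Decidable (Spec_modoAuto2 dictyT out) := by unfold Spec_modoAuto2; infer_instance

-- ===== CLAIM (what is proved, stated in full; the proofs are below) =====
def Claim_equal_modoAuto2 : Prop := ∀ (dictyT : List (String × String)), Dom_modoAuto2 dictyT → Spec_modoAuto2 dictyT (modoAuto2 dictyT)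

-- ===== LEMMAS AND PROOFS =====

/-- Simple recursive split on the quote character. -/
def qsplit : List Char → List (List Char)
  | [] => [[]]
  | c :: rest =>
    if c = '"' then [] :: qsplit rest
    else
      match qsplit rest with
      | p :: ps => (c :: p) :: ps
      | [] => [[c]]

lemma qsplit_ne_nil (l : List Char) : qsplit l ≠ [] := by
  cases l with
  | nil => simp [qsplit]
  | cons c rest =>
    simp only [qsplit]
    split
    · simp
    · cases h : qsplit rest <;> simp

/-- Prepend onto the head part. -/
def consHead (x : List Char) : List (List Char) → List (List Char)
  | [] => [x]
  | p :: ps => (x ++ p) :: ps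

lemma splitOn_go_spec : ∀ (fuel : Nat) (l cur : List Char) (accs : List (List Char)),
    l.length < fuel →
    PySem.Chars.splitOn.go ['"'] fuel l cur accs =
      accs.reverse ++ consHead cur.reverse (qsplit l) := by
  intro fuel
  induction fuel with
  | zero => intro l cur accs h; omega
  | succ n ih =>
    intro l cur accs h
    cases l with
    | nil =>
      simp [PySem.Chars.splitOn.go, qsplit, consHead]
    | cons c rest =>
      simp only [PySem.Chars.splitOn.go]
      by_cases hc : c = '"'
      · subst hc
        have hpre : List.isPrefixOf ['"'] ('"' :: rest) = true := by
          simp [List.isPrefixOf]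
        simp only [hpre, if_pos]
        rw [show List.drop ['"'].length ('"' :: rest) = rest from rfl]
        rw [ih rest [] (List.reverse cur :: accs) (by simp at h ⊢; omega)]
        have hq := qsplit_ne_nil rest
        cases hqr : qsplit rest with
        | nil => exact absurd hqr hq
        | cons p ps =>
          simp [qsplit, consHead, hqr]
      · have hpre : List.isPrefixOf ['"'] (c :: rest) = false := by
          simp [List.isPrefixOf]
          exact fun hh => hc hh.symm
        simp only [hpre, Bool.false_eq_true, if_false]
        rw [ih rest (c :: cur) accs (by simp at h ⊢; omega)]
        have hq := qsplit_ne_nil rest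
        cases hqr : qsplit rest with
        | nil => exact absurd hqr hq
        | cons p ps =>
          simp [qsplit, consHead, hqr, hc]

lemma splitOn_eq_qsplit (l : List Char) :
    PySem.Chars.splitOn l ['"'] = qsplit l := by
  unfold PySem.Chars.splitOn
  rw [splitOn_go_spec (l.length + 1) l [] [] (by omega)]
  have hq := qsplit_ne_nil l
  cases hqr : qsplit l with
  | nil => exact absurd hqr hq
  | cons p ps => simp [consHead]

/-- A's loop as a direct recursion with the single flag `primera`. -/
def aRec : List Char → Bool → List Char
  | [], _ => []
  | c :: rest, b =>
    if c = '"' then (if b then 'Ƈ' else 'Ɔ') :: aRec rest (!b)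
    else c :: aRec rest b

lemma pvAVal_fold (l : List Char) : ∀ (acc : List Char) (b : Bool),
    (l.foldl
      (fun (st : List Char × Bool × Bool) c =>
        if c == '"' && st.2.1 then (st.1 ++ ['Ƈ'], false, true)
        else if c == '"' && st.2.2 then (st.1 ++ ['Ɔ'], true, false)
        else (st.1 ++ [c], st.2.1, st.2.2))
      (acc, b, !b)).1 = acc ++ aRec l b := by
  induction l with
  | nil => intro acc b; simp [aRec]
  | cons c rest ih =>
    intro acc b
    by_cases hc : c = '"'
    · subst hc
      cases b with
      | true =>
        simpa [aRec, List.foldl_cons] using ih (acc ++ ['Ƈ']) false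
      | false =>
        simpa [aRec, List.foldl_cons] using ih (acc ++ ['Ɔ']) true
    · simpa [aRec, hc, List.foldl_cons] using ih (acc ++ [c]) b

lemma pvAVal_eq_aRec (l : List Char) : pvAVal l = aRec l true := by
  unfold pvAVal
  exact pvAVal_fold l [] true

/-- Glyphs interleaved between the parts, alternating from flag `b`. -/
def glue : Bool → List (List Char) → List Char
  | _, [] => []
  | b, p :: ps => (if b then 'Ƈ' else 'Ɔ') :: (p ++ glue (!b) ps)

lemma aRec_eq_qsplit (l : List Char) : ∀ (b : Bool),
    aRec l b = (qsplit l).headD [] ++ glue b ((qsplit l).drop 1) := by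
  induction l with
  | nil => intro b; simp [aRec, qsplit, glue]
  | cons c rest ih =>
    intro b
    by_cases hc : c = '"'
    · subst hc
      have hq := qsplit_ne_nil rest
      cases hqr : qsplit rest with
      | nil => exact absurd hqr hq
      | cons p ps =>
        simp [aRec, qsplit, hqr, glue, ih (!b)]
    · have hq := qsplit_ne_nil rest
      cases hqr : qsplit rest with
      | nil => exact absurd hqr hq
      | cons p ps =>
        simp [aRec, qsplit, hc, hqr, ih b]

lemma bFold_glue (ps : List (List Char)) : ∀ (s : Nat) (out : List Char),
    (PySem.List.enumerate ps (s : Int)).foldl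
      (fun out ip =>
        out ++ (if PySem.Int.mod ip.1 2 == 0 then ['Ƈ'] else ['Ɔ']) ++ ip.2)
      out = out ++ glue (s % 2 == 0) ps := by
  induction ps with
  | nil => intro s out; simp [PySem.List.enumerate_nil, glue]
  | cons p ps ih =>
    intro s out
    rw [PySem.List.enumerate_cons]
    have hmod : PySem.Int.mod (s : Int) 2 = ((s % 2 : Nat) : Int) := by
      simp [PySem.Int.mod, Int.fmod_eq_emod]
    have hcast : ((s : Int) + 1) = ((s + 1 : Nat) : Int) := by push_cast; ring
    have hpar : ((s + 1) % 2 == 0) = !(s % 2 == 0) := by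
      rcases Nat.mod_two_eq_zero_or_one s with h | h <;> simp [Nat.add_mod, h]
    have hif : (((s % 2 : Nat) : Int) == 0) = (s % 2 == 0) := by
      rcases Nat.mod_two_eq_zero_or_one s with h | h <;> simp [h]
    simp only [List.foldl_cons, hmod, hcast, hif]
    rw [ih (s + 1)]
    rw [hpar]
    cases hb : (s % 2 == 0) <;> simp [glue]

lemma pvBVal_eq (l : List Char) :
    pvBVal l = (qsplit l).headD [] ++ glue true ((qsplit l).drop 1) := by
  unfold pvBVal
  rw [splitOn_eq_qsplit]
  cases hqr : qsplit l with
  | nil => exact absurd hqr (qsplit_ne_nil l)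
  | cons p ps =>
    have hget : PySem.List.pyGetD (p :: ps) 0 [] = p := by
      simp [PySem.List.pyGetD, PySem.List.pyGet?, PySem.List.pyIdx?]
    simp only [PySem.List.slice_from_one, hget]
    simpa using bFold_glue ps 0 p

lemma pvAVal_eq_pvBVal (l : List Char) : pvAVal l = pvBVal l := by
  rw [pvAVal_eq_aRec, aRec_eq_qsplit, pvBVal_eq]

-- ===== VERDICT (by name: the statement is the Claim_ definition above) =====
theorem modoAuto2_spec : Claim_equal_modoAuto2 := by
  intro dictyT _
  unfold Spec_modoAuto2 modoAuto2 modoAuto2_alt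
  simp [pvAVal_eq_pvBVal]
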